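-- pv_equiv track=rewrite | github.com/usmanzafar289/cartpole-neuralnetwork | eca_bit_rule_evolve.py | obs_to_input
-- ===== SOURCE A (Python) =====
-- row_width = 12              # length of each row
--
-- def obs_to_input(observation):
--     output = []
--     i = 0
--
--     for j in range(row_width):
--         i = j % 4
--         if (observation[i] < 0):
--             output.append(0)
--         else:
--             output.append(1)
--
--     return output
-- ===== SOURCE B (Python) =====
-- def obs_to_input(observation):
--     base = [0 if observation[i] < 0 else 1 for i in range(4)]
--     return base * 3
-- ===== Notes on version B (the rewrite author's own statement) =====
-- stated objective: simpler
-- what changed: B computes the 4-entry sign block once with a comprehension and tiles it three times (base * 3), instead of A's 12-iteration loop with a modular index.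
import Mathlib
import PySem

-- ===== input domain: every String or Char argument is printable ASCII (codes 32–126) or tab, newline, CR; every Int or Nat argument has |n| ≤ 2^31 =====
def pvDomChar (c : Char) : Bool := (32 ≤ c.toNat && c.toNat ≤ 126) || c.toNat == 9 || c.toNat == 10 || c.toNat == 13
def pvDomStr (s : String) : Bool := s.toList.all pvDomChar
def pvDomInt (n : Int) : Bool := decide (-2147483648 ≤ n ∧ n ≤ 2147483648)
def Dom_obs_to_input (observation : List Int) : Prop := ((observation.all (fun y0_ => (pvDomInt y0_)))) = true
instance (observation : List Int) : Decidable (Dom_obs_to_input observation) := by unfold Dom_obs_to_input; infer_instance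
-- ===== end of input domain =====

-- B builds the 4-entry sign block once and tiles it three times instead of A's 12-step loop with j % 4; objective: simpler.
-- ===== PORT A =====
def obs_to_input (observation : List Int) : List Int :=
  (PySem.List.pyRange 0 12 1).foldl (fun output j =>
    let i := PySem.Int.mod j 4
    if PySem.List.pyGetD observation i 0 < 0 then output ++ [0] else output ++ [1]) []

-- ===== PORT B =====
def obs_to_input_alt (observation : List Int) : List Int :=
  let base := (PySem.List.pyRange 0 4 1).map
    (fun i => if PySem.List.pyGetD observation i 0 < 0 then (0 : Int) else 1)
  base ++ base ++ base

-- ===== PRECONDITION & SPEC =====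
-- Pre_ excludes lists shorter than 4, on which Python A raises IndexError.
def Pre_obs_to_input (observation : List Int) : Prop := 4 ≤ observation.length
instance (observation : List Int) : Decidable (Pre_obs_to_input observation) := by unfold Pre_obs_to_input; infer_instance
def pvWitness_obs_to_input : List Int := [-1, 0, 2, -3]

def Spec_obs_to_input (observation : List Int) (out : List Int) : Prop := out = obs_to_input_alt observation
instance (observation : List Int) (out : List Int) : Decidable (Spec_obs_to_input observation out) := by unfold Spec_obs_to_input; infer_instance

-- ===== CLAIM (what is proved, stated in full; the proofs are below) =====
def Claim_equal_obs_to_input : Prop := ∀ (observation : List Int), Dom_obs_to_input observation → Pre_obs_to_input observation → Spec_obs_to_input observation (obs_to_input observation)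

-- ===== LEMMAS AND PROOFS =====

-- ===== VERDICT (by name: the statement is the Claim_ definition above) =====
theorem obs_to_input_spec : Claim_equal_obs_to_input := by
  intro observation _ hpre
  obtain ⟨a, b, c, d, rest, rfl⟩ : ∃ a b c d rest, observation = a :: b :: c :: d :: rest := by
    match observation, hpre with
    | a :: b :: c :: d :: rest, _ => exact ⟨a, b, c, d, rest, rfl⟩
  unfold Spec_obs_to_input obs_to_input obs_to_input_alt
  have h0 : (0:Int) ≤ (rest.length:Int) + 1 + 1 + 1 := by omega
  have h0' : (0:Int) ≤ (rest.length:Int) + 1 + 1 := by omega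
  have h2 : (2:Int) ≤ (rest.length:Int) + 1 + 1 + 1 := by omega
  have h3 : (3:Int) ≤ (rest.length:Int) + 1 + 1 + 1 := by omega
  simp [PySem.List.pyRange, PySem.Int.mod, PySem.List.pyGetD, PySem.List.pyIdx?,
        PySem.List.pyGet?, List.range_succ, h0, h0', h2, h3]
  split_ifs <;> rfl
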